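-- pv_equiv track=rewrite | github.com/6210qwe/leetcode_py | leetcode_solutions/by_id/q3559.py | min_valid_strings_to_form_target
-- ===== SOURCE A (Python) =====
-- from typing import List, Optional
--
-- def min_valid_strings_to_form_target(words: List[str], target: str) -> int:
--     """
--     函数式接口 - 计算形成目标字符串所需的最少字符串数量
--     """
--     n = len(target)
--     dp = [float('inf')] * (n + 1)
--     dp[0] = 0
--
--     for i in range(n):
--         for word in words:
--             if target[i:i+len(word)] == word:
--                 dp[i + len(word)] = min(dp[i + len(word)], dp[i] + 1)
--
--     return dp[n] if dp[n] != float('inf') else -1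
-- ===== SOURCE B (Python) =====
-- def min_valid_strings_to_form_target(words, target):
--     """
--     Level-by-level BFS shortest path over target positions: position j is
--     reachable from i when some word equals target[i:j]; the BFS level at
--     which position n is first reached is the answer.
--     """
--     n = len(target)
--     frontier = {0}
--     visited = {0}
--     for steps in range(n + 1):
--         if n in frontier:
--             return steps
--         nxt = set()
--         for i in frontier:
--             for w in words:
--                 j = i + len(w)
--                 if w and j <= n and j not in visited and target[i:j] == w:
--                     nxt.add(j)
--                     visited.add(j)
--         frontier = nxt
--     return -1
-- ===== Notes on version B (the rewrite author's own statement) =====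
-- stated objective: alternative
-- what changed: A fills a dp table of minimum word counts for every prefix by rescanning the whole word list at every target position; B instead runs a breadth-first search on the graph of target positions (edge i->j when some word equals target[i:j]) with a frontier and a visited set, returning the BFS level at which position n is first reached, visiting each reachable position once and stopping early.
import Mathlib
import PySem

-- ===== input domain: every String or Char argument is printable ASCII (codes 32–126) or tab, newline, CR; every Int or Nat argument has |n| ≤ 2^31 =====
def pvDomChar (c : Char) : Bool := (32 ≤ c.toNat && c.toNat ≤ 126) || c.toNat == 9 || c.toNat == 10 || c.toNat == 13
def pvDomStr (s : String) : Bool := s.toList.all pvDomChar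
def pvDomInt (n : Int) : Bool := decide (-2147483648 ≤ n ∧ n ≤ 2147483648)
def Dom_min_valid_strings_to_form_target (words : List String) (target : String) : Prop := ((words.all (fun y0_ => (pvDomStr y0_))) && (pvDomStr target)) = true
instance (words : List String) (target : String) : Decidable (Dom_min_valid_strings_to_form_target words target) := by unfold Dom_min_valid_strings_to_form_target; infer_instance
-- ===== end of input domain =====

-- B replaces A's prefix dp-table (which rescans every word at every target position) by a
-- level-by-level breadth-first search over target positions with a frontier and a visited set;
-- A and B are proved to return the same value on every input (both are total).

-- ===== PORT A =====
-- Python's float('inf') sentinel is modelled as `none`: in A it is only created, compared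
-- by `!=` to itself, and combined with `min` / `+ 1`, which `ominA` / `Option.map` mirror exactly.
def ominA (a b : Option Int) : Option Int :=
  match a, b with
  | none, b => b
  | some a, none => some a
  | some a, some b => some (min a b)

-- the body of A's inner `for word in words` loop (dp indices are in range whenever the slice
-- comparison succeeds, so `List.getD`/`List.set` are exact for Python's dp[·] read/write)
def innerW (cs : List Char) (i : Nat) (dp : List (Option Int)) (w : List Char) : List (Option Int) :=
  if PySem.List.slice cs (some (i:Int)) (some ((i:Int) + (w.length:Int))) = w then
    dp.set (i + w.length) (ominA (dp.getD (i + w.length) none) ((dp.getD i none).map (· + 1)))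
  else dp

def min_valid_strings_to_form_target (words : List String) (target : String) : Int :=
  let cs := target.toList
  let n := cs.length
  let dp := (List.range n).foldl
    (fun dp i => words.foldl (fun dp word => innerW cs i dp word.toList) dp)
    ((List.replicate (n+1) (none : Option Int)).set 0 (some 0))
  match dp.getD n none with
  | some v => v
  | none => -1

-- ===== PORT B =====
-- body of Source B's inner `for w in words` loop; state = (nxt, visited)
def relaxB (cs : List Char) (n i : Nat) (st : PySem.Set Nat × PySem.Set Nat) (w : List Char) :
    PySem.Set Nat × PySem.Set Nat :=
  let j := i + w.length
  if w ≠ [] ∧ j ≤ n ∧ ¬ (PySem.Set.contains st.2 j = true) ∧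
      PySem.List.slice cs (some (i:Int)) (some ((i:Int) + (w.length:Int))) = w then
    (PySem.Set.add st.1 j, PySem.Set.add st.2 j)
  else st

-- Source B's `for steps in range(n+1)` loop: fuel = remaining iterations, steps = the loop index
def bfsB (words : List String) (cs : List Char) (n : Nat) :
    Nat → Nat → PySem.Set Nat → PySem.Set Nat → Int
  | 0, _, _, _ => -1
  | f+1, steps, frontier, visited =>
    if PySem.Set.contains frontier n = true then (steps : Int)
    else
      let p := frontier.foldl
        (fun st i => words.foldl (fun st word => relaxB cs n i st word.toList) st)
        ((PySem.Set.empty : PySem.Set Nat), visited)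
      bfsB words cs n f (steps + 1) p.1 p.2

def min_valid_strings_to_form_target_alt (words : List String) (target : String) : Int :=
  let cs := target.toList
  let n := cs.length
  bfsB words cs n (n + 1) 0 (PySem.Set.ofList [0]) (PySem.Set.ofList [0])

-- ===== PRECONDITION & SPEC =====
def Spec_min_valid_strings_to_form_target (words : List String) (target : String) (out : Int) : Prop := out = min_valid_strings_to_form_target_alt words target
instance (words : List String) (target : String) (out : Int) : Decidable (Spec_min_valid_strings_to_form_target words target out) := by unfold Spec_min_valid_strings_to_form_target; infer_instance

-- ===== CLAIM (what is proved, stated in full; the proofs are below) =====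
def Claim_equal_min_valid_strings_to_form_target : Prop := ∀ (words : List String) (target : String), Dom_min_valid_strings_to_form_target words target → Spec_min_valid_strings_to_form_target words target (min_valid_strings_to_form_target words target)

-- ===== LEMMAS AND PROOFS =====

-- ---- generic facts about ominA-folds ("minimum of the some-candidates") ----
def obest {α : Type} (f : α → Option Int) (l : List α) : Option Int :=
  l.foldl (fun a x => ominA a (f x)) none

theorem ominA_none_right (a : Option Int) : ominA a none = a := by cases a <;> rfl

theorem ominA_assoc (a b c : Option Int) : ominA (ominA a b) c = ominA a (ominA b c) := by
  cases a <;> cases b <;> cases c <;> simp [ominA, min_assoc]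

theorem ominA_none_left (b : Option Int) : ominA none b = b := rfl

theorem ominA_absorb (a : Option Int) : ominA a (a.map (· + 1)) = a := by
  cases a with
  | none => rfl
  | some v => simp [ominA]

theorem foldl_ominA_init {α : Type} (f : α → Option Int) (l : List α) (a : Option Int) :
    l.foldl (fun a x => ominA a (f x)) a = ominA a (obest f l) := by
  induction l generalizing a with
  | nil => simp [obest, List.foldl_nil, ominA_none_right]
  | cons x l ih =>
    simp only [obest, List.foldl_cons] at *
    rw [ih (ominA a (f x)), ih (ominA none (f x)), ominA_none_left, ominA_assoc]

theorem obest_cons {α : Type} (f : α → Option Int) (x : α) (l : List α) :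
    obest f (x :: l) = ominA (f x) (obest f l) := by
  show (x :: l).foldl (fun a x => ominA a (f x)) none = _
  rw [List.foldl_cons, foldl_ominA_init]
  rfl

theorem obest_append {α : Type} (f : α → Option Int) (l1 l2 : List α) :
    obest f (l1 ++ l2) = ominA (obest f l1) (obest f l2) := by
  show (l1 ++ l2).foldl _ none = _
  rw [List.foldl_append, foldl_ominA_init]
  rfl

theorem obest_congr {α : Type} {f g : α → Option Int} {l : List α}
    (h : ∀ x ∈ l, f x = g x) : obest f l = obest g l := by
  induction l with
  | nil => rfl
  | cons x l ih =>
    rw [obest_cons, obest_cons, h x (by simp), ih (fun y hy => h y (by simp [hy]))]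

theorem obest_none_iff {α : Type} (f : α → Option Int) (l : List α) :
    obest f l = none ↔ ∀ x ∈ l, f x = none := by
  induction l with
  | nil => simp [obest]
  | cons x l ih =>
    rw [obest_cons]
    cases hx : f x <;> cases hl : obest f l <;> simp_all [ominA]

-- obest is ≤ every some-candidate
theorem obest_le {α : Type} {f : α → Option Int} {l : List α} {x : α} {c : Int}
    (hx : x ∈ l) (hc : f x = some c) : ∃ m, obest f l = some m ∧ m ≤ c := by
  induction l with
  | nil => cases hx
  | cons y l ih =>
    rw [obest_cons]
    rcases List.mem_cons.mp hx with h | h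
    · subst h
      rw [hc]
      cases hl : obest f l with
      | none => exact ⟨c, rfl, le_refl c⟩
      | some b => exact ⟨min c b, rfl, min_le_left c b⟩
    · rcases ih h with ⟨m, hm, hmc⟩
      rw [hm]
      cases hy : f y with
      | none => exact ⟨m, rfl, hmc⟩
      | some a => exact ⟨min a m, rfl, le_trans (min_le_right a m) hmc⟩

-- obest is attained by some candidate
theorem obest_attained {α : Type} {f : α → Option Int} {l : List α} {m : Int}
    (h : obest f l = some m) : ∃ x ∈ l, f x = some m := by
  induction l with
  | nil => simp [obest] at h
  | cons x l ih =>
    rw [obest_cons] at h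
    cases hx : f x with
    | none =>
      rw [hx] at h
      cases hl : obest f l with
      | none => rw [hl] at h; cases h
      | some b =>
        rw [hl] at h
        simp only [ominA_none_left] at h
        rcases ih (hl.trans h) with ⟨y, hy, hfy⟩
        exact ⟨y, by simp [hy], hfy⟩
    | some a =>
      rw [hx] at h
      cases hl : obest f l with
      | none =>
        rw [hl, ominA_none_right] at h
        exact ⟨x, by simp, by rw [hx, h]⟩
      | some b =>
        rw [hl] at h
        simp only [ominA, Option.some.injEq] at h
        rcases le_total a b with hab | hab
        · rw [min_eq_left hab] at h
          exact ⟨x, by simp, by rw [hx, h]⟩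
        · rw [min_eq_right hab] at h
          rcases ih (by rw [hl, h]) with ⟨y, hy, hfy⟩
          exact ⟨y, by simp [hy], hfy⟩

-- two obests with the same candidate-value behaviour (mutual domination) are equal
theorem obest_eq_of_dominates {α β : Type} {f : α → Option Int} {g : β → Option Int}
    {l : List α} {l' : List β}
    (h1 : ∀ x ∈ l, ∀ c, f x = some c → ∃ y ∈ l', ∃ c', g y = some c' ∧ c' ≤ c)
    (h2 : ∀ y ∈ l', ∀ c, g y = some c → ∃ x ∈ l, ∃ c', f x = some c' ∧ c' ≤ c) :
    obest f l = obest g l' := by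
  cases hf : obest f l with
  | none =>
    cases hg : obest g l' with
    | none => rfl
    | some m =>
      rcases obest_attained hg with ⟨y, hy, hgy⟩
      rcases h2 y hy m hgy with ⟨x, hx, c', hfx, _⟩
      rcases obest_le hx hfx with ⟨m', hm', _⟩
      rw [hf] at hm'; cases hm'
  | some m =>
    rcases obest_attained hf with ⟨x, hx, hfx⟩
    rcases h1 x hx m hfx with ⟨y, hy, c', hgy, hc'⟩
    rcases obest_le hy hgy with ⟨m2, hm2, hm2le⟩
    rw [hm2]
    rcases obest_attained hm2 with ⟨y2, hy2, hgy2⟩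
    rcases h2 y2 hy2 m2 hgy2 with ⟨x2, hx2, c2, hfx2, hc2⟩
    rcases obest_le hx2 hfx2 with ⟨m3, hm3, hm3le⟩
    rw [hf] at hm3
    cases hm3
    congr 1
    omega

-- ---- the semantic reference: minimal number of words forming a string ----
inductive Forms (wl : List (List Char)) : List Char → Nat → Prop
  | nil : Forms wl [] 0
  | cons {w s k} (hw : w ∈ wl) (hne : w ≠ []) (h : Forms wl s k) : Forms wl (w ++ s) (k+1)

theorem forms_zero_nil {wl : List (List Char)} {s : List Char} (h : Forms wl s 0) : s = [] := by
  cases h; rfl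

theorem length_pos_of_ne_nil {w : List Char} (h : w ≠ []) : 1 ≤ w.length := by
  cases w with
  | nil => exact absurd rfl h
  | cons a l => simp

theorem forms_le {wl : List (List Char)} {s : List Char} {k : Nat}
    (h : Forms wl s k) : k ≤ s.length := by
  induction h with
  | nil => simp
  | cons hw hne h ih =>
    rename_i w s k
    have := length_pos_of_ne_nil hne
    simp only [List.length_append]
    omega

theorem forms_snoc {wl : List (List Char)} {s w : List Char} {k : Nat}
    (h : Forms wl s k) (hw : w ∈ wl) (hne : w ≠ []) : Forms wl (s ++ w) (k+1) := by
  induction h with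
  | nil => simpa using Forms.cons hw hne Forms.nil
  | cons hw0 hne0 h0 ih =>
    rename_i w0 s0 k0
    have := Forms.cons hw0 hne0 ih
    simpa [List.append_assoc] using this

-- every nonempty formation splits off its LAST word
theorem forms_last {wl : List (List Char)} {t : List Char} {k : Nat}
    (h : Forms wl t (k+1)) : ∃ s w, t = s ++ w ∧ w ∈ wl ∧ w ≠ [] ∧ Forms wl s k := by
  induction k generalizing t with
  | zero =>
    cases h with
    | cons hw hne h0 =>
      rename_i w s
      have hs : s = [] := forms_zero_nil h0
      subst hs
      exact ⟨[], w, by simp, hw, hne, Forms.nil⟩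
  | succ k ih =>
    cases h with
    | cons hw hne h0 =>
      rename_i w s
      rcases ih h0 with ⟨s', w', hs, hw', hne', hf'⟩
      exact ⟨w ++ s', w', by simp [hs, List.append_assoc], hw', hne',
        Forms.cons hw hne hf'⟩

def IsOpt (wl : List (List Char)) (s : List Char) (v : Option Int) : Prop :=
  (v = none ∧ ∀ k, ¬ Forms wl s k) ∨
  (∃ m : Nat, v = some (m : Int) ∧ Forms wl s m ∧ ∀ k, Forms wl s k → m ≤ k)

-- ---- the prefix recurrence (A's direction) ----
def preAux (wl : List (List Char)) (cs : List Char) : Nat → Nat → Option Int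
  | 0, _ => some 0
  | f+1, j =>
    if j = 0 then some 0
    else obest (fun w => if w ≠ [] ∧ w.length ≤ j ∧ (cs.drop (j - w.length)).take w.length = w then
      (preAux wl cs f (j - w.length)).map (· + 1) else none) wl

def pre (wl : List (List Char)) (cs : List Char) (j : Nat) : Option Int := preAux wl cs j j

theorem preAux_eq (wl : List (List Char)) (cs : List Char) (f f' j : Nat)
    (hf : j ≤ f) (hf' : j ≤ f') : preAux wl cs f j = preAux wl cs f' j := by
  induction f using Nat.strong_induction_on generalizing f' j with
  | _ f ih =>
    match f, f' with
    | 0, f' =>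
      have : j = 0 := Nat.le_zero.mp hf
      subst this
      cases f' <;> simp [preAux]
    | f+1, 0 =>
      have : j = 0 := Nat.le_zero.mp hf'
      subst this
      simp [preAux]
    | f+1, f'+1 =>
      by_cases hj : j = 0
      · simp [preAux, hj]
      · simp only [preAux, if_neg hj]
        apply obest_congr
        intro w _
        by_cases hw : w ≠ [] ∧ w.length ≤ j ∧ (cs.drop (j - w.length)).take w.length = w
        · simp only [if_pos hw]
          have hw1 : 1 ≤ w.length := length_pos_of_ne_nil hw.1
          congr 1
          exact ih f (Nat.lt_succ_self f) f' (j - w.length) (by omega) (by omega)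
        · rw [if_neg hw, if_neg hw]

theorem pre_zero (wl : List (List Char)) (cs : List Char) : pre wl cs 0 = some 0 := rfl

theorem pre_succ (wl : List (List Char)) (cs : List Char) (j : Nat) (hj : j ≠ 0) :
    pre wl cs j = obest (fun w => if w ≠ [] ∧ w.length ≤ j ∧ (cs.drop (j - w.length)).take w.length = w then
      (pre wl cs (j - w.length)).map (· + 1) else none) wl := by
  unfold pre
  rw [show j = (j - 1) + 1 by omega]
  simp only [preAux, if_neg (show ¬((j-1)+1 = 0) by omega)]
  apply obest_congr
  intro w _
  by_cases hw : w ≠ [] ∧ w.length ≤ (j-1)+1 ∧ (cs.drop ((j-1)+1 - w.length)).take w.length = w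
  · simp only [if_pos hw]
    have hw1 : 1 ≤ w.length := length_pos_of_ne_nil hw.1
    congr 1
    apply preAux_eq
    · omega
    · omega
  · rw [if_neg hw, if_neg hw]

-- ---- optimality of the prefix recurrence ----
theorem pre_isOpt (wl : List (List Char)) (cs : List Char) (j : Nat) (hj : j ≤ cs.length) :
    IsOpt wl (cs.take j) (pre wl cs j) := by
  induction j using Nat.strong_induction_on with
  | _ j ih =>
    by_cases hj0 : j = 0
    · subst hj0
      rw [pre_zero]
      right
      exact ⟨0, rfl, by simpa using Forms.nil, fun k _ => Nat.zero_le k⟩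
    · rw [pre_succ wl cs j hj0]
      have htlen : (cs.take j).length = j := by simp; omega
      -- the match condition is exactly "cs.take j = cs.take (j - w.length) ++ w"
      have hcond_iff : ∀ w : List Char, w.length ≤ j →
          ((cs.drop (j - w.length)).take w.length = w ↔ cs.take j = cs.take (j - w.length) ++ w) := by
        intro w hwj
        constructor
        · intro h
          have : cs.take j = cs.take (j - w.length) ++ (cs.drop (j - w.length)).take (j - (j - w.length)) := by
            rw [← List.take_add]
            congr 1
            omega
          rw [this, show j - (j - w.length) = w.length by omega, h]
        · intro h
          have h1 : (cs.take j).drop (j - w.length) = w := by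
            rw [h]
            exact List.drop_left' (by simp; omega)
          rw [List.drop_take] at h1
          rw [show j - (j - w.length) = w.length by omega] at h1
          exact h1
      cases hv : obest (fun w => if w ≠ [] ∧ w.length ≤ j ∧ (cs.drop (j - w.length)).take w.length = w then
          (pre wl cs (j - w.length)).map (· + 1) else none) wl with
      | none =>
        left
        refine ⟨rfl, fun k hk => ?_⟩
        cases k with
        | zero =>
          have := forms_zero_nil hk
          rw [← List.length_eq_zero_iff, htlen] at this
          exact hj0 this
        | succ k =>
          rcases forms_last hk with ⟨s, w, hsplit, hw, hne, hf⟩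
          have hlens : s.length + w.length = j := by
            have := congrArg List.length hsplit
            simp [htlen] at this
            omega
          have hwj : w.length ≤ j := by omega
          have hs_eq : s = cs.take (j - w.length) := by
            have h1 : s = (cs.take j).take (j - w.length) := by
              rw [show j - w.length = s.length by omega, hsplit, List.take_left]
            rw [h1, List.take_take]
            congr 1
            omega
          have hmatch : (cs.drop (j - w.length)).take w.length = w := by
            rw [hcond_iff w hwj, ← hs_eq, ← hsplit]
          have hrec := ih (j - w.length) (by have := length_pos_of_ne_nil hne; omega) (by omega)
          rcases hrec with ⟨_, hno⟩ | ⟨m, hm, _, _⟩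
          · exact hno k (by rw [← hs_eq]; exact hf)
          · have hnone := (obest_none_iff _ wl).mp hv w hw
            beta_reduce at hnone
            rw [if_pos ⟨hne, hwj, hmatch⟩, hm] at hnone
            simp at hnone
      | some m =>
        right
        rcases obest_attained hv with ⟨w, hw, hfw⟩
        by_cases hcond : w ≠ [] ∧ w.length ≤ j ∧ (cs.drop (j - w.length)).take w.length = w
        swap
        · rw [if_neg hcond] at hfw; cases hfw
        rw [if_pos hcond] at hfw
        cases hc : pre wl cs (j - w.length) with
        | none => rw [hc] at hfw; cases hfw
        | some c =>
          rw [hc] at hfw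
          simp at hfw
          have hwlen := length_pos_of_ne_nil hcond.1
          rcases ih (j - w.length) (by omega) (by omega) with ⟨hnone, _⟩ | ⟨m0, hm0, hf0, hmin0⟩
          · rw [hc] at hnone; cases hnone
          · rw [hc] at hm0
            cases hm0
            have hmval : m = ((m0 + 1 : Nat) : Int) := by push_cast; omega
            refine ⟨m0 + 1, by rw [hmval], ?_, ?_⟩
            · rw [(hcond_iff w hcond.2.1).mp hcond.2.2]
              exact forms_snoc hf0 hw hcond.1
            · intro k hk
              cases k with
              | zero =>
                have := forms_zero_nil hk
                rw [← List.length_eq_zero_iff, htlen] at this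
                exact absurd this hj0
              | succ k =>
                rcases forms_last hk with ⟨s', w', hsplit', hw', hne', hf'⟩
                have hlens' : s'.length + w'.length = j := by
                  have := congrArg List.length hsplit'
                  simp [htlen] at this
                  omega
                have hwj' : w'.length ≤ j := by omega
                have hs_eq' : s' = cs.take (j - w'.length) := by
                  have h1 : s' = (cs.take j).take (j - w'.length) := by
                    rw [show j - w'.length = s'.length by omega, hsplit', List.take_left]
                  rw [h1, List.take_take]
                  congr 1
                  omega
                have hmatch' : (cs.drop (j - w'.length)).take w'.length = w' := by
                  rw [hcond_iff w' hwj', ← hs_eq', ← hsplit']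
                rcases ih (j - w'.length) (by have := length_pos_of_ne_nil hne'; omega) (by omega) with
                  ⟨_, hno'⟩ | ⟨m1, hm1, _, hmin1⟩
                · exact absurd (by rw [← hs_eq']; exact hf') (hno' k)
                · have hm1k : m1 ≤ k := hmin1 k (by rw [← hs_eq']; exact hf')
                  have hcand : (fun w => if w ≠ [] ∧ w.length ≤ j ∧ (cs.drop (j - w.length)).take w.length = w then
                      (pre wl cs (j - w.length)).map (· + 1) else none) w' = some ((m1 : Int) + 1) := by
                    beta_reduce
                    rw [if_pos ⟨hne', hwj', hmatch'⟩, hm1]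
                    rfl
                  rcases obest_le (f := fun w => if w ≠ [] ∧ w.length ≤ j ∧ (cs.drop (j - w.length)).take w.length = w then
                      (pre wl cs (j - w.length)).map (· + 1) else none) hw' hcand with ⟨m2, hm2, hm2le⟩
                  rw [hv] at hm2
                  cases hm2
                  omega

-- every value of pre is a Nat cast bounded by j
theorem pre_nat (wl : List (List Char)) (cs : List Char) (j : Nat) (hj : j ≤ cs.length)
    {c : Int} (hc : pre wl cs j = some c) : ∃ m : Nat, c = (m : Int) ∧ m ≤ j := by
  rcases pre_isOpt wl cs j hj with ⟨hn, _⟩ | ⟨m, hm, hf, _⟩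
  · rw [hc] at hn; cases hn
  · rw [hc] at hm
    cases hm
    refine ⟨m, rfl, ?_⟩
    have := forms_le hf
    simp only [List.length_take] at this
    omega

-- pre j = some 0 forces j = 0 (for j ≤ |cs|)
theorem pre_eq_zero (wl : List (List Char)) (cs : List Char) (j : Nat) (hj : j ≤ cs.length)
    (h : pre wl cs j = some ((0 : Nat) : Int)) : j = 0 := by
  rcases pre_isOpt wl cs j hj with ⟨hn, _⟩ | ⟨m, hm, hf, _⟩
  · rw [h] at hn; cases hn
  · rw [h] at hm
    have hm0 : m = 0 := by
      have := Option.some.inj hm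
      omega
    subst hm0
    have := forms_zero_nil hf
    have := congrArg List.length this
    simp only [List.length_take, List.length_nil] at this
    omega

-- ---- list-array utilities ----
theorem getD_set_self' (l : List (Option Int)) (i : Nat) (v : Option Int) (h : i < l.length) :
    (l.set i v).getD i none = v := by
  simp [List.getD_eq_getElem?_getD, h]

theorem getD_set_ne' (l : List (Option Int)) (i j : Nat) (v : Option Int) (h : i ≠ j) :
    (l.set i v).getD j none = l.getD j none := by
  simp [List.getD_eq_getElem?_getD, List.getElem?_set_ne h]

theorem obest_singleton {α : Type} (f : α → Option Int) (x : α) : obest f [x] = f x := by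
  rw [obest_cons]
  show ominA (f x) none = f x
  exact ominA_none_right _

theorem foldl_fun_congr {α β : Type} {f g : β → α → β} {l : List α} (b : β)
    (h : ∀ b x, f b x = g b x) : l.foldl f b = l.foldl g b := by
  induction l generalizing b with
  | nil => rfl
  | cons x l ih => simp only [List.foldl_cons, h, ih]

-- ---- A-side: the forward loop computes the prefix recurrence ----
theorem innerW_eq (cs : List Char) (i : Nat) (dp : List (Option Int)) (w : List Char) :
    innerW cs i dp w =
      if (cs.drop i).take w.length = w then
        dp.set (i + w.length) (ominA (dp.getD (i + w.length) none) ((dp.getD i none).map (· + 1)))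
      else dp := by
  unfold innerW
  rw [PySem.List.slice_natCast_add]

def candA (cs : List Char) (v : Option Int) (i j : Nat) (w : List Char) : Option Int :=
  if i + w.length = j ∧ (cs.drop i).take w.length = w then v.map (· + 1) else none

theorem foldl_innerW (cs : List Char) (i : Nat) (hi : i < cs.length)
    (l : List (List Char)) (dp : List (Option Int)) (hlen : dp.length = cs.length + 1) :
    (l.foldl (innerW cs i) dp).length = cs.length + 1 ∧
    ∀ j, j ≤ cs.length → (l.foldl (innerW cs i) dp).getD j none =
      if j = i then dp.getD i none
      else ominA (dp.getD j none) (obest (candA cs (dp.getD i none) i j) l) := by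
  induction l generalizing dp with
  | nil =>
    refine ⟨hlen, fun j hj => ?_⟩
    simp only [List.foldl_nil, obest, ominA_none_right]
    split_ifs with h
    · rw [h]
    · rfl
  | cons w l ih =>
    have hcases : ((cs.drop i).take w.length ≠ w ∧ innerW cs i dp w = dp) ∨
        ((cs.drop i).take w.length = w ∧
         innerW cs i dp w = dp.set (i + w.length)
           (ominA (dp.getD (i + w.length) none) ((dp.getD i none).map (· + 1)))) := by
      rw [innerW_eq]
      by_cases hm : (cs.drop i).take w.length = w
      · right; exact ⟨hm, by rw [if_pos hm]⟩
      · left; exact ⟨hm, by rw [if_neg hm]⟩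
    have hlen' : (innerW cs i dp w).length = cs.length + 1 := by
      rcases hcases with ⟨_, h⟩ | ⟨_, h⟩ <;> rw [h] <;> simp [hlen]
    have hgi : (innerW cs i dp w).getD i none = dp.getD i none := by
      rcases hcases with ⟨_, h⟩ | ⟨hm, h⟩
      · rw [h]
      · rw [h]
        by_cases hw : w = []
        · subst hw
          simp only [List.length_nil, Nat.add_zero]
          rw [getD_set_self' _ _ _ (by omega)]
          exact ominA_absorb _
        · have := length_pos_of_ne_nil hw
          rw [getD_set_ne' _ _ _ _ (by omega)]
    rcases ih (innerW cs i dp w) hlen' with ⟨ihlen, ihval⟩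
    refine ⟨by simpa using ihlen, fun j hj => ?_⟩
    rw [List.foldl_cons]
    rw [ihval j hj, hgi]
    by_cases hji : j = i
    · rw [if_pos hji, if_pos hji]
    · rw [if_neg hji, if_neg hji, obest_cons, ← ominA_assoc]
      congr 1
      rcases hcases with ⟨hm, h⟩ | ⟨hm, h⟩
      · rw [h]
        have hc : candA cs (dp.getD i none) i j w = none := by
          unfold candA
          rw [if_neg (by tauto)]
        rw [hc, ominA_none_right]
      · by_cases hij : i + w.length = j
        · rw [h, hij, getD_set_self' _ _ _ (by omega)]
          unfold candA
          rw [if_pos ⟨hij, hm⟩]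
        · rw [h, getD_set_ne' _ _ _ _ hij]
          have hc : candA cs (dp.getD i none) i j w = none := by
            unfold candA
            rw [if_neg (by tauto)]
          rw [hc, ominA_none_right]

-- ---- A-side: outer loop invariant ----
def loopA (cs : List Char) (wl : List (List Char)) (t : Nat) : List (Option Int) :=
  (List.range t).foldl (fun dp i => wl.foldl (innerW cs i) dp)
    ((List.replicate (cs.length+1) (none : Option Int)).set 0 (some 0))

def contribA (cs : List Char) (wl : List (List Char)) (j i : Nat) : Option Int :=
  obest (candA cs (pre wl cs i) i j) wl

theorem dp0_getD (cs : List Char) (j : Nat) (hj : j ≤ cs.length) :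
    ((List.replicate (cs.length+1) (none : Option Int)).set 0 (some 0)).getD j none
      = if j = 0 then some 0 else none := by
  by_cases h : j = 0
  · subst h
    rw [getD_set_self' _ _ _ (by simp)]
    simp
  · rw [getD_set_ne' _ _ _ _ (Ne.symm h), if_neg h]
    simp only [List.getD_eq_getElem?_getD, List.getElem?_replicate]
    split_ifs <;> rfl

theorem flattenA (cs : List Char) (wl : List (List Char)) (j : Nat)
    (hj1 : 1 ≤ j) (_hjn : j ≤ cs.length) :
    obest (fun i => contribA cs wl j i) (List.range j) = pre wl cs j := by
  rw [pre_succ wl cs j (by omega)]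
  apply obest_eq_of_dominates
  · intro i hi c hc
    have hc' : obest (candA cs (pre wl cs i) i j) wl = some c := hc
    rcases obest_attained hc' with ⟨w, hw, hcw⟩
    have hmem : i < j := List.mem_range.mp hi
    unfold candA at hcw
    by_cases hcond : i + w.length = j ∧ (cs.drop i).take w.length = w
    swap
    · rw [if_neg hcond] at hcw; cases hcw
    rw [if_pos hcond] at hcw
    refine ⟨w, hw, c, ?_, le_refl c⟩
    show (if w ≠ [] ∧ w.length ≤ j ∧ (cs.drop (j - w.length)).take w.length = w then
        (pre wl cs (j - w.length)).map (· + 1) else none) = some c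
    have hwne : w ≠ [] := by
      intro he
      subst he
      simp at hcond
      omega
    have hwj : w.length ≤ j := by omega
    have hji : j - w.length = i := by omega
    rw [if_pos ⟨hwne, hwj, by rw [hji]; exact hcond.2⟩, hji]
    exact hcw
  · intro w hw c hgw
    have hgw' : (if w ≠ [] ∧ w.length ≤ j ∧ (cs.drop (j - w.length)).take w.length = w then
        (pre wl cs (j - w.length)).map (· + 1) else none) = some c := hgw
    by_cases hcond : w ≠ [] ∧ w.length ≤ j ∧ (cs.drop (j - w.length)).take w.length = w
    swap
    · rw [if_neg hcond] at hgw'; cases hgw'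
    rw [if_pos hcond] at hgw'
    have hw1 := length_pos_of_ne_nil hcond.1
    have hcA : candA cs (pre wl cs (j - w.length)) (j - w.length) j w = some c := by
      unfold candA
      rw [if_pos ⟨by omega, hcond.2.2⟩]
      exact hgw'
    rcases obest_le (f := candA cs (pre wl cs (j - w.length)) (j - w.length) j) hw hcA with
      ⟨m, hm, hmle⟩
    exact ⟨j - w.length, List.mem_range.mpr (by omega), m, hm, hmle⟩

theorem loopA_inv (cs : List Char) (wl : List (List Char)) :
    ∀ t, t ≤ cs.length →
      (loopA cs wl t).length = cs.length + 1 ∧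
      ∀ j, j ≤ cs.length → (loopA cs wl t).getD j none =
        if j ≤ t then pre wl cs j
        else obest (fun i => contribA cs wl j i) (List.range t) := by
  intro t
  induction t with
  | zero =>
    intro _
    refine ⟨by simp [loopA], fun j hj => ?_⟩
    show ((List.replicate (cs.length+1) (none : Option Int)).set 0 (some 0)).getD j none = _
    rw [dp0_getD cs j hj]
    by_cases h : j = 0
    · subst h
      rw [if_pos rfl, if_pos (by omega)]
      rfl
    · rw [if_neg h, if_neg (by omega)]
      rfl
  | succ t ih =>
    intro ht
    have ht' : t ≤ cs.length := by omega
    rcases ih ht' with ⟨ihlen, ihval⟩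
    have hstep : loopA cs wl (t+1) = wl.foldl (innerW cs t) (loopA cs wl t) := by
      unfold loopA
      rw [List.range_succ, List.foldl_append]
      simp
    have hti : (loopA cs wl t).getD t none = pre wl cs t := by
      rw [ihval t ht']
      simp
    rcases foldl_innerW cs t (by omega) wl (loopA cs wl t) ihlen with ⟨hlen2, hval2⟩
    refine ⟨by rw [hstep]; exact hlen2, fun j hj => ?_⟩
    rw [hstep, hval2 j hj, hti]
    by_cases hjt : j = t
    · subst hjt
      rw [if_pos rfl, if_pos (by omega)]
    · rw [if_neg hjt]
      by_cases hjlt : j < t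
      · have hnone : obest (candA cs (pre wl cs t) t j) wl = none := by
          rw [obest_none_iff]
          intro w hw
          unfold candA
          rw [if_neg (by rintro ⟨h1, _⟩; omega)]
        rw [ihval j hj, if_pos (by omega), hnone, ominA_none_right, if_pos (by omega)]
      · have h1 : (loopA cs wl t).getD j none
            = obest (fun i => contribA cs wl j i) (List.range t) := by
          rw [ihval j hj, if_neg (by omega)]
        rw [h1]
        change ominA _ (contribA cs wl j t) = _
        have h2 : ominA (obest (fun i => contribA cs wl j i) (List.range t)) (contribA cs wl j t)
            = obest (fun i => contribA cs wl j i) (List.range (t+1)) := by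
          rw [List.range_succ, obest_append, obest_singleton]
        rw [h2]
        by_cases hj1 : j = t + 1
        · rw [if_pos (by omega), hj1]
          exact flattenA cs wl (t+1) (by omega) (by omega)
        · rw [if_neg (by omega)]

theorem portA_eq (words : List String) (target : String) :
    min_valid_strings_to_form_target words target =
      (match pre (words.map String.toList) target.toList target.toList.length with
       | some v => v
       | none => -1) := by
  show (match ((List.range target.toList.length).foldl
      (fun dp i => words.foldl (fun dp word => innerW target.toList i dp word.toList) dp)
      ((List.replicate (target.toList.length+1) (none : Option Int)).set 0 (some 0))).getD
      target.toList.length none with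
    | some v => v
    | none => -1) = _
  have hfold : ∀ (dp : List (Option Int)) (i : Nat),
      words.foldl (fun dp word => innerW target.toList i dp word.toList) dp
        = (words.map String.toList).foldl (innerW target.toList i) dp := by
    intro dp i
    rw [List.foldl_map]
  rw [foldl_fun_congr _ hfold]
  have := (loopA_inv target.toList (words.map String.toList) target.toList.length le_rfl).2
    target.toList.length le_rfl
  rw [show ((List.range target.toList.length).foldl
      (fun dp i => (words.map String.toList).foldl (innerW target.toList i) dp)
      ((List.replicate (target.toList.length+1) (none : Option Int)).set 0 (some 0)))
      = loopA target.toList (words.map String.toList) target.toList.length from rfl]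
  rw [this, if_pos le_rfl]

-- ---- B-side: BFS levels compute the sets {j : pre j = s} ----

-- an edge of the position graph: some word equals target[i:j]
def EdgeP (wl : List (List Char)) (cs : List Char) (i j : Nat) : Prop :=
  ∃ w, w ∈ wl ∧ w ≠ [] ∧ i + w.length = j ∧ j ≤ cs.length ∧ (cs.drop i).take w.length = w

theorem set_contains_iff (s : PySem.Set Nat) (x : Nat) :
    PySem.Set.contains s x = true ↔ x ∈ s := by
  constructor
  · exact List.mem_of_elem_eq_true
  · exact List.elem_eq_true_of_mem

-- invariant tying visited to the original visited set plus the nxt set under construction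
def HInv (V0 : List Nat) (st : PySem.Set Nat × PySem.Set Nat) : Prop :=
  ∀ x, x ∈ st.2 ↔ x ∈ V0 ∨ x ∈ st.1

theorem relax_fold_inner (cs : List Char) (V0 : List Nat) (i : Nat) :
    ∀ (wl : List (List Char)) (st : PySem.Set Nat × PySem.Set Nat), HInv V0 st →
      HInv V0 (wl.foldl (relaxB cs cs.length i) st) ∧
      ∀ x, x ∈ (wl.foldl (relaxB cs cs.length i) st).1 ↔
        x ∈ st.1 ∨ (x ∉ V0 ∧ ∃ w, w ∈ wl ∧ w ≠ [] ∧ i + w.length = x ∧ x ≤ cs.length ∧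
          (cs.drop i).take w.length = w) := by
  intro wl
  induction wl with
  | nil =>
    intro st hH
    exact ⟨hH, fun x => by simp⟩
  | cons w wl ih =>
    intro st hH
    have hslice : PySem.List.slice cs (some (i:Int)) (some ((i:Int) + (w.length:Int)))
        = (cs.drop i).take w.length := PySem.List.slice_natCast_add ..
    by_cases hc : w ≠ [] ∧ i + w.length ≤ cs.length ∧
        ¬ (PySem.Set.contains st.2 (i + w.length) = true) ∧
        PySem.List.slice cs (some (i:Int)) (some ((i:Int) + (w.length:Int))) = w
    · have hstep : relaxB cs cs.length i st w = (PySem.Set.add st.1 (i + w.length), PySem.Set.add st.2 (i + w.length)) := by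
        unfold relaxB
        rw [if_pos hc]
      have hnotmem : (i + w.length) ∉ st.2 := by
        intro hm
        exact hc.2.2.1 ((set_contains_iff _ _).mpr hm)
      have hH' : HInv V0 (PySem.Set.add st.1 (i + w.length), PySem.Set.add st.2 (i + w.length)) := by
        intro x
        simp only [PySem.Set.mem_add]
        rw [hH x]
        tauto
      rcases ih (PySem.Set.add st.1 (i + w.length), PySem.Set.add st.2 (i + w.length)) hH' with ⟨ih1, ih2⟩
      rw [List.foldl_cons, hstep]
      refine ⟨ih1, fun x => ?_⟩
      rw [ih2 x]
      simp only [PySem.Set.mem_add]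
      constructor
      · rintro ((hx | hx) | hx)
        · exact Or.inl hx
        · subst hx
          refine Or.inr ⟨?_, w, by simp, hc.1, rfl, hc.2.1, ?_⟩
          · intro hv
            exact hnotmem ((hH _).mpr (Or.inl hv))
          · rw [← hslice, hc.2.2.2]
        · rcases hx with ⟨hv, w', hw', rest⟩
          exact Or.inr ⟨hv, w', by simp [hw'], rest⟩
      · rintro (hx | ⟨hv, w', hw', hne', hlen', hle', htk'⟩)
        · exact Or.inl (Or.inl hx)
        · rcases List.mem_cons.mp hw' with he | he
          · subst he
            exact Or.inl (Or.inr hlen'.symm)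
          · exact Or.inr ⟨hv, w', he, hne', hlen', hle', htk'⟩
    · have hstep : relaxB cs cs.length i st w = st := by
        unfold relaxB
        rw [if_neg hc]
      rcases ih st hH with ⟨ih1, ih2⟩
      rw [List.foldl_cons, hstep]
      refine ⟨ih1, fun x => ?_⟩
      rw [ih2 x]
      constructor
      · rintro (hx | ⟨hv, w', hw', rest⟩)
        · exact Or.inl hx
        · exact Or.inr ⟨hv, w', by simp [hw'], rest⟩
      · rintro (hx | ⟨hv, w', hw', hne', hlen', hle', htk'⟩)
        · exact Or.inl hx
        · rcases List.mem_cons.mp hw' with he | he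
          · -- w' = w: the skipped word must have failed only the visited test,
            -- so x is already in st.1 (it is not in V0)
            subst he
            have hx' : x ∈ st.2 := by
              by_contra hnm
              apply hc
              refine ⟨hne', hlen' ▸ hle', ?_, ?_⟩
              · rw [hlen']
                intro hct
                exact hnm ((set_contains_iff _ _).mp hct)
              · rw [hslice, htk']
            rcases (hH x).mp hx' with h | h
            · exact absurd h hv
            · exact Or.inl h
          · exact Or.inr ⟨hv, w', he, hne', hlen', hle', htk'⟩

theorem relax_fold_outer (cs : List Char) (V0 : List Nat) (wl : List (List Char)) :
    ∀ (F : List Nat) (st : PySem.Set Nat × PySem.Set Nat), HInv V0 st →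
      HInv V0 (F.foldl (fun st i => wl.foldl (relaxB cs cs.length i) st) st) ∧
      ∀ x, x ∈ (F.foldl (fun st i => wl.foldl (relaxB cs cs.length i) st) st).1 ↔
        x ∈ st.1 ∨ (x ∉ V0 ∧ ∃ i ∈ F, EdgeP wl cs i x) := by
  intro F
  induction F with
  | nil =>
    intro st hH
    exact ⟨hH, fun x => by simp⟩
  | cons i F ih =>
    intro st hH
    rcases relax_fold_inner cs V0 i wl st hH with ⟨h1, h2⟩
    rcases ih _ h1 with ⟨ih1, ih2⟩
    rw [List.foldl_cons]
    refine ⟨ih1, fun x => ?_⟩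
    rw [ih2 x, h2 x]
    unfold EdgeP
    constructor
    · rintro ((hx | ⟨hv, hw⟩) | ⟨hv, i', hi', hw⟩)
      · exact Or.inl hx
      · exact Or.inr ⟨hv, i, by simp, hw⟩
      · exact Or.inr ⟨hv, i', by simp [hi'], hw⟩
    · rintro (hx | ⟨hv, i', hi', hw⟩)
      · exact Or.inl (Or.inl hx)
      · rcases List.mem_cons.mp hi' with he | he
        · subst he
          exact Or.inl (Or.inr ⟨hv, hw⟩)
        · exact Or.inr ⟨hv, i', he, hw⟩

-- the frontier/visited sets at BFS level s
def GoodF (wl : List (List Char)) (cs : List Char) (s : Nat) (F : List Nat) : Prop :=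
  ∀ j, j ∈ F ↔ (j ≤ cs.length ∧ pre wl cs j = some ((s : Nat) : Int))

def GoodV (wl : List (List Char)) (cs : List Char) (s : Nat) (V : List Nat) : Prop :=
  ∀ j, j ∈ V ↔ (j ≤ cs.length ∧ ∃ k : Nat, k ≤ s ∧ pre wl cs j = some ((k : Nat) : Int))

-- BFS step characterization: pre j = s+1 iff j is unvisited and has a predecessor at level s
theorem pre_level_succ (wl : List (List Char)) (cs : List Char) (s j : Nat) (hj : j ≤ cs.length) :
    pre wl cs j = some ((s + 1 : Nat) : Int) ↔
      (¬ ∃ k : Nat, k ≤ s ∧ pre wl cs j = some ((k : Nat) : Int)) ∧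
      ∃ i, i ≤ cs.length ∧ pre wl cs i = some ((s : Nat) : Int) ∧ EdgeP wl cs i j := by
  constructor
  · intro h
    refine ⟨?_, ?_⟩
    · rintro ⟨k, hk, he⟩
      rw [h] at he
      have := Option.some.inj he
      omega
    · have hj0 : j ≠ 0 := by
        intro he
        subst he
        rw [pre_zero] at h
        have := Option.some.inj h
        omega
      rw [pre_succ wl cs j hj0] at h
      rcases obest_attained h with ⟨w, hw, hfw⟩
      by_cases hcond : w ≠ [] ∧ w.length ≤ j ∧ (cs.drop (j - w.length)).take w.length = w
      swap
      · rw [if_neg hcond] at hfw; cases hfw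
      rw [if_pos hcond] at hfw
      cases hc : pre wl cs (j - w.length) with
      | none => rw [hc] at hfw; cases hfw
      | some c =>
        rw [hc] at hfw
        simp only [Option.map_some, Option.some.injEq] at hfw
        rcases pre_nat wl cs (j - w.length) (by omega) hc with ⟨m, hm, _⟩
        have hms : m = s := by omega
        subst hms
        refine ⟨j - w.length, by omega, by rw [hc, hm], w, hw, hcond.1, by omega, hj, hcond.2.2⟩
  · rintro ⟨hnk, i, hin, hpi, w, hw, hne, hij, _, htake⟩
    have hw1 := length_pos_of_ne_nil hne
    have hj0 : j ≠ 0 := by omega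
    have hji : j - w.length = i := by omega
    have hcand : (fun w => if w ≠ [] ∧ w.length ≤ j ∧ (cs.drop (j - w.length)).take w.length = w then
        (pre wl cs (j - w.length)).map (· + 1) else none) w = some (((s : Nat) : Int) + 1) := by
      beta_reduce
      rw [if_pos ⟨hne, by omega, by rw [hji]; exact htake⟩, hji, hpi]
      rfl
    rw [pre_succ wl cs j hj0]
    rcases obest_le (f := fun w => if w ≠ [] ∧ w.length ≤ j ∧ (cs.drop (j - w.length)).take w.length = w then
        (pre wl cs (j - w.length)).map (· + 1) else none) hw hcand with ⟨m', hm', hle⟩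
    rw [← pre_succ wl cs j hj0] at hm'
    rcases pre_nat wl cs j hj hm' with ⟨m, hm, _⟩
    subst hm
    have hms : ¬ (m ≤ s) := fun hms => hnk ⟨m, hms, hm'⟩
    have : m = s + 1 := by omega
    subst this
    exact pre_succ wl cs j hj0 ▸ hm'

-- one BFS level preserves the invariants, advancing s
theorem level_good (wl : List (List Char)) (cs : List Char) (s : Nat) (F V : List Nat)
    (hF : GoodF wl cs s F) (hV : GoodV wl cs s V) :
    GoodF wl cs (s+1)
      (F.foldl (fun st i => wl.foldl (relaxB cs cs.length i) st)
        ((PySem.Set.empty : PySem.Set Nat), V)).1 ∧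
    GoodV wl cs (s+1)
      (F.foldl (fun st i => wl.foldl (relaxB cs cs.length i) st)
        ((PySem.Set.empty : PySem.Set Nat), V)).2 := by
  have hH0 : HInv V ((PySem.Set.empty : PySem.Set Nat), V) := by
    intro x
    simp [PySem.Set.empty]
  rcases relax_fold_outer cs V wl F _ hH0 with ⟨hH, hmem⟩
  have hF' : GoodF wl cs (s+1)
      (F.foldl (fun st i => wl.foldl (relaxB cs cs.length i) st)
        ((PySem.Set.empty : PySem.Set Nat), V)).1 := by
    intro j
    rw [hmem j]
    simp only [PySem.Set.empty, List.not_mem_nil, false_or]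
    constructor
    · rintro ⟨hv, i, hiF, hedge⟩
      rcases (hF i).mp hiF with ⟨hin, hpi⟩
      have hjn : j ≤ cs.length := by
        rcases hedge with ⟨w, _, _, _, hjle, _⟩
        exact hjle
      refine ⟨hjn, (pre_level_succ wl cs s j hjn).mpr ⟨?_, i, hin, hpi, hedge⟩⟩
      intro hk
      exact hv ((hV j).mpr ⟨hjn, hk⟩)
    · rintro ⟨hjn, hpj⟩
      rcases (pre_level_succ wl cs s j hjn).mp hpj with ⟨hnk, i, hin, hpi, hedge⟩
      refine ⟨?_, i, (hF i).mpr ⟨hin, hpi⟩, hedge⟩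
      intro hv
      exact hnk ((hV j).mp hv).2
  refine ⟨hF', fun j => ?_⟩
  rw [hH j, hV j, hF' j]
  constructor
  · rintro (⟨hjn, k, hk, hpk⟩ | ⟨hjn, hp⟩)
    · exact ⟨hjn, k, by omega, hpk⟩
    · exact ⟨hjn, s+1, le_rfl, hp⟩
  · rintro ⟨hjn, k, hk, hpk⟩
    by_cases hks : k ≤ s
    · exact Or.inl ⟨hjn, k, hks, hpk⟩
    · have : k = s + 1 := by omega
      subst this
      exact Or.inr ⟨hjn, hpk⟩

-- running the loop when the target is unreachable
theorem bfsB_none (words : List String) (cs : List Char)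
    (hpre : pre (words.map String.toList) cs cs.length = none) :
    ∀ f s (F V : PySem.Set Nat), GoodF (words.map String.toList) cs s F →
      GoodV (words.map String.toList) cs s V →
      bfsB words cs cs.length f s F V = -1 := by
  intro f
  induction f with
  | zero => intro s F V _ _; rfl
  | succ f ih =>
    intro s F V hF hV
    have hnc : ¬ (PySem.Set.contains F cs.length = true) := by
      intro hct
      rcases (hF cs.length).mp ((set_contains_iff _ _).mp hct) with ⟨_, hp⟩
      rw [hpre] at hp
      cases hp
    show (if PySem.Set.contains F cs.length = true then ((s:Nat) : Int) else _) = -1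
    rw [if_neg hnc]
    have hconv : ∀ (st : PySem.Set Nat × PySem.Set Nat) (i : Nat),
        words.foldl (fun st word => relaxB cs cs.length i st word.toList) st
          = (words.map String.toList).foldl (relaxB cs cs.length i) st := by
      intro st i
      rw [List.foldl_map]
    rw [foldl_fun_congr _ hconv]
    rcases level_good (words.map String.toList) cs s F V hF hV with ⟨hF', hV'⟩
    exact ih (s+1) _ _ hF' hV'

-- running the loop when the minimum is m
theorem bfsB_some (words : List String) (cs : List Char) (m : Nat)
    (hpre : pre (words.map String.toList) cs cs.length = some ((m : Nat) : Int)) :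
    ∀ f s (F V : PySem.Set Nat), GoodF (words.map String.toList) cs s F →
      GoodV (words.map String.toList) cs s V → s ≤ m → m - s < f →
      bfsB words cs cs.length f s F V = ((m : Nat) : Int) := by
  intro f
  induction f with
  | zero => intro s F V _ _ _ h; omega
  | succ f ih =>
    intro s F V hF hV hsm hfuel
    by_cases hsm' : s = m
    · subst hsm'
      have hc : PySem.Set.contains F cs.length = true :=
        (set_contains_iff _ _).mpr ((hF cs.length).mpr ⟨le_rfl, hpre⟩)
      show (if PySem.Set.contains F cs.length = true then ((s:Nat) : Int) else _) = _
      rw [if_pos hc]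
    · have hnc : ¬ (PySem.Set.contains F cs.length = true) := by
        intro hct
        rcases (hF cs.length).mp ((set_contains_iff _ _).mp hct) with ⟨_, hp⟩
        rw [hpre] at hp
        have := Option.some.inj hp
        omega
      show (if PySem.Set.contains F cs.length = true then ((s:Nat) : Int) else _) = _
      rw [if_neg hnc]
      have hconv : ∀ (st : PySem.Set Nat × PySem.Set Nat) (i : Nat),
          words.foldl (fun st word => relaxB cs cs.length i st word.toList) st
            = (words.map String.toList).foldl (relaxB cs cs.length i) st := by
        intro st i
        rw [List.foldl_map]
      rw [foldl_fun_congr _ hconv]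
      rcases level_good (words.map String.toList) cs s F V hF hV with ⟨hF', hV'⟩
      exact ih (s+1) _ _ hF' hV' (by omega) (by omega)

-- B computes the same match on pre as A does
theorem portB_eq (words : List String) (target : String) :
    min_valid_strings_to_form_target_alt words target =
      (match pre (words.map String.toList) target.toList target.toList.length with
       | some v => v
       | none => -1) := by
  have hF0 : GoodF (words.map String.toList) target.toList 0 (PySem.Set.ofList [0]) := by
    intro j
    constructor
    · intro hj
      have hj0 : j = 0 := by
        have := (PySem.Set.mem_ofList _ _).mp hj
        simpa using this
      subst hj0
      exact ⟨Nat.zero_le _, pre_zero _ _⟩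
    · rintro ⟨hjn, hp⟩
      have := pre_eq_zero (words.map String.toList) target.toList j hjn hp
      subst this
      exact (PySem.Set.mem_ofList _ _).mpr (by simp)
  have hV0 : GoodV (words.map String.toList) target.toList 0 (PySem.Set.ofList [0]) := by
    intro j
    constructor
    · intro hj
      have hj0 : j = 0 := by
        have := (PySem.Set.mem_ofList _ _).mp hj
        simpa using this
      subst hj0
      exact ⟨Nat.zero_le _, 0, le_rfl, pre_zero _ _⟩
    · rintro ⟨hjn, k, hk, hp⟩
      have hk0 : k = 0 := by omega
      subst hk0
      have := pre_eq_zero (words.map String.toList) target.toList j hjn hp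
      subst this
      exact (PySem.Set.mem_ofList _ _).mpr (by simp)
  show bfsB words target.toList target.toList.length (target.toList.length + 1) 0
      (PySem.Set.ofList [0]) (PySem.Set.ofList [0]) = _
  cases hp : pre (words.map String.toList) target.toList target.toList.length with
  | none => exact bfsB_none words target.toList hp _ 0 _ _ hF0 hV0
  | some c =>
    rcases pre_nat (words.map String.toList) target.toList target.toList.length le_rfl hp with
      ⟨m, hm, hmn⟩
    subst hm
    exact bfsB_some words target.toList m hp _ 0 _ _ hF0 hV0 (Nat.zero_le _) (by omega)

-- ===== VERDICT (by name: the statement is the Claim_ definition above) =====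
theorem min_valid_strings_to_form_target_spec : Claim_equal_min_valid_strings_to_form_target := by
  intro words target _
  unfold Spec_min_valid_strings_to_form_target
  rw [portA_eq, portB_eq]
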